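-- pv_equiv track=rewrite | github.com/WonderMing13/freemacinput | test_block_comment.py | isInsideBlockComment
-- ===== SOURCE A (Python) =====
-- def isInsideBlockComment(text: str, offset: int) -> bool:
--     """检测光标是否在块注释内部 - 与修复后的 Kotlin 代码一致"""
--     safeOffset = min(offset, len(text))
--
--     # 方法1: 检查光标之前的深度（处理跨行注释）
--     depth = 0
--     i = 0
--     while i < safeOffset:
--         if i + 1 <= safeOffset:
--             twoChars = text[i:i+2]
--             if twoChars == "/*":
--                 # 计数：如果 /* 开始位置 < 光标位置
--                 if i < safeOffset:
--                     depth += 1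
--                 i += 2
--             elif twoChars == "*/":
--                 # 计数：如果 */ 开始位置 < 光标位置
--                 if i < safeOffset:
--                     if depth > 0:
--                         depth -= 1
--                 i += 2
--             else:
--                 i += 1
--         else:
--             i += 1
--
--     # 如果深度 > 0，光标在注释内
--     if depth > 0:
--         return True
--
--     # 方法2: 检查当前行内是否有 /* 和 */
--     # 获取当前行
--     last_newline = text.rfind('\n', 0, safeOffset)
--     line_start = last_newline + 1 if last_newline >= 0 else 0
--     next_newline = text.find('\n', safeOffset)
--     line_end = next_newline if next_newline >= 0 else len(text)
--     current_line = text[line_start:line_end]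
--
--     line_offset = safeOffset - line_start
--
--     # 查找 /* 和 */ 在当前行的位置
--     open_pos = current_line.find("/*")
--     close_pos = current_line.find("*/")
--
--     if open_pos < 0:
--         # 当前行没有 /*，不在块注释内
--         return False
--
--     if close_pos < 0:
--         # 有 /* 没有 */，在注释内
--         return True
--
--     if close_pos <= open_pos:
--         # */ 在 /* 之前或同一位置，不在注释内
--         return False
--
--     # 光标在 /* 之后、*/ 之前
--     return line_offset > open_pos + 2 and line_offset < close_pos
-- ===== SOURCE B (Python) =====
-- def isInsideBlockComment(text: str, offset: int) -> bool:
--     safe = min(offset, len(text))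
--     # Phase 1: jump marker-to-marker with str.find instead of stepping char by char.
--     depth = 0
--     i = 0
--     while True:
--         o = text.find('/*', i)
--         c = text.find('*/', i)
--         if o < 0 and c < 0:
--             break
--         if c < 0 or (0 <= o and o < c):
--             pos, is_open = o, True
--         else:
--             pos, is_open = c, False
--         if pos >= safe:
--             break
--         if is_open:
--             depth += 1
--         elif depth > 0:
--             depth -= 1
--         i = pos + 2
--     if depth > 0:
--         return True
--     # Phase 2: current-line check, folded into one boolean expression.
--     line_start = text.rfind('\n', 0, safe) + 1
--     line_end = text.find('\n', safe)
--     if line_end < 0: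
--         line_end = len(text)
--     current_line = text[line_start:line_end]
--     line_offset = safe - line_start
--     open_pos = current_line.find('/*')
--     close_pos = current_line.find('*/')
--     return open_pos >= 0 and (close_pos < 0 or
--         (close_pos > open_pos and open_pos + 2 < line_offset < close_pos))
-- ===== Notes on version B (the rewrite author's own statement) =====
-- stated objective: faster
-- what changed: Phase 1 no longer steps char by char slicing text[i:i+2]: B jumps from marker to marker with str.find('/*', i) / str.find('*/', i), folding the depth over the markers before the clamped offset; phase 2's early-return chain is folded into one boolean expression.
import Mathlib
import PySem

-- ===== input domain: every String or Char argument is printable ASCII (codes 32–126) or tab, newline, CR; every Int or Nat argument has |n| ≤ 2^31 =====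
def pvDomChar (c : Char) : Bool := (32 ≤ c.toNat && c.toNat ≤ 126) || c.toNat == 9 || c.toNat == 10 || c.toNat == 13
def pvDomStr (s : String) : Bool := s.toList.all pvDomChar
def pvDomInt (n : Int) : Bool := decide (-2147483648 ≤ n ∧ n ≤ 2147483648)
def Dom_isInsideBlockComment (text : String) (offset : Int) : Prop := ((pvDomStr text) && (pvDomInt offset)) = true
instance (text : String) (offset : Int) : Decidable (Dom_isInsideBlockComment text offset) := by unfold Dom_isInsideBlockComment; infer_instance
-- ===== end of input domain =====

-- B replaces A's char-by-char phase-1 scan by str.find jumps from marker to marker (objective: faster, measured);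
-- phase 2 (current-line check) is folded into one boolean expression. Return values agree on all inputs.

-- ===== PORT A =====
-- A's phase-1 while loop: i steps by 1 or 2, depth counts unmatched '/*' before safe.
def pvScanA (cs : List Char) (safe : Int) (i : Nat) (depth : Int) : Int :=
  if _h : (i : Int) < safe then
    if (i : Int) + 1 ≤ safe then
      let twoChars := PySem.List.slice cs (some (i : Int)) (some ((i : Int) + 2))
      if twoChars = ['/', '*'] then
        pvScanA cs safe (i + 2) (if (i : Int) < safe then depth + 1 else depth)
      else if twoChars = ['*', '/'] then
        pvScanA cs safe (i + 2)
          (if (i : Int) < safe then (if depth > 0 then depth - 1 else depth) else depth)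
      else pvScanA cs safe (i + 1) depth
    else pvScanA cs safe (i + 1) depth
  else depth
termination_by (safe - (i : Int)).toNat
decreasing_by all_goals omega

def isInsideBlockComment (text : String) (offset : Int) : Bool :=
  let cs := text.toList
  let safe : Int := min offset (cs.length : Int)
  let depth := pvScanA cs safe 0 0
  if depth > 0 then true
  else
    let lastNewline := PySem.Chars.rfindFrom cs ['\n'] 0 (some safe)
    let lineStart : Int := if lastNewline ≥ 0 then lastNewline + 1 else 0
    let nextNewline := PySem.Chars.findFrom cs ['\n'] safe
    let lineEnd : Int := if nextNewline ≥ 0 then nextNewline else (cs.length : Int)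
    let currentLine := PySem.List.slice cs (some lineStart) (some lineEnd)
    let lineOffset := safe - lineStart
    let openPos := PySem.Chars.find currentLine ['/', '*']
    let closePos := PySem.Chars.find currentLine ['*', '/']
    if openPos < 0 then false
    else if closePos < 0 then true
    else if closePos ≤ openPos then false
    else decide (lineOffset > openPos + 2 ∧ lineOffset < closePos)

-- ===== PORT B =====
-- B's phase-1 loop: find the next marker of either kind with str.find, fold the depth, stop at safe.
-- fuel (length+1) only bounds the loop: each iteration jumps past a found marker, so it never runs out.
def pvScanB (cs : List Char) (safe : Int) : Nat → Int → Nat → Int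
  | _, depth, 0 => depth
  | i, depth, fuel + 1 =>
    let o := PySem.Chars.findFrom cs ['/', '*'] (i : Int)
    let c := PySem.Chars.findFrom cs ['*', '/'] (i : Int)
    if o < 0 ∧ c < 0 then depth
    else
      let pc := if c < 0 ∨ (0 ≤ o ∧ o < c) then (o, true) else (c, false)
      if pc.1 ≥ safe then depth
      else pvScanB cs safe (pc.1.toNat + 2)
        (if pc.2 then depth + 1 else if depth > 0 then depth - 1 else depth) fuel

def isInsideBlockComment_alt (text : String) (offset : Int) : Bool :=
  let cs := text.toList
  let safe : Int := min offset (cs.length : Int)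
  if pvScanB cs safe 0 0 (cs.length + 1) > 0 then true
  else
    let lineStart := PySem.Chars.rfindFrom cs ['\n'] 0 (some safe) + 1
    let nextNewline := PySem.Chars.findFrom cs ['\n'] safe
    let lineEnd : Int := if nextNewline < 0 then (cs.length : Int) else nextNewline
    let currentLine := PySem.List.slice cs (some lineStart) (some lineEnd)
    let lineOffset := safe - lineStart
    let openPos := PySem.Chars.find currentLine ['/', '*']
    let closePos := PySem.Chars.find currentLine ['*', '/']
    decide (0 ≤ openPos ∧ (closePos < 0 ∨
      (openPos < closePos ∧ openPos + 2 < lineOffset ∧ lineOffset < closePos)))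

-- ===== PRECONDITION & SPEC =====
def Spec_isInsideBlockComment (text : String) (offset : Int) (out : Bool) : Prop := out = isInsideBlockComment_alt text offset
instance (text : String) (offset : Int) (out : Bool) : Decidable (Spec_isInsideBlockComment text offset out) := by unfold Spec_isInsideBlockComment; infer_instance

-- ===== CLAIM (what is proved, stated in full; the proofs are below) =====
def Claim_equal_isInsideBlockComment : Prop := ∀ (text : String) (offset : Int), Dom_isInsideBlockComment text offset → Spec_isInsideBlockComment text offset (isInsideBlockComment text offset)

-- ===== LEMMAS AND PROOFS =====

theorem pv_neg_one_le_rfind_go (s sub : List Char) : ∀ n, -1 ≤ PySem.Chars.rfind.go s sub n := by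
  intro n
  induction n with
  | zero => simp [PySem.Chars.rfind.go]; split <;> omega
  | succ k ih =>
    simp only [PySem.Chars.rfind.go]
    split
    · omega
    · exact ih

theorem pv_neg_one_le_rfindFrom (s sub : List Char) (e : Int) :
    -1 ≤ PySem.Chars.rfindFrom s sub 0 (some e) := by
  unfold PySem.Chars.rfindFrom PySem.Chars.rfind
  split_ifs <;> simp <;> try omega
  generalize (if (s.length : Int) < e then (s.length : Int) else if e < 0 then if e + ↑s.length < 0 then 0 else e + ↑s.length else e) = E
  have hr := pv_neg_one_le_rfind_go (List.take E.toNat s) sub (min E.toNat s.length)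
  split_ifs <;> omega

theorem pv_findFrom_self (cs sub : List Char) (i : Nat) (hi : i ≤ cs.length)
    (h : sub <+: cs.drop i) : PySem.Chars.findFrom cs sub (i : Int) = (i : Int) := by
  have hnn : 0 ≤ PySem.Chars.find (cs.drop i) sub :=
    (PySem.Chars.find_nonneg_iff (cs.drop i) sub).mpr h.isInfix
  have h0 : PySem.Chars.find (cs.drop i) sub = 0 := by
    obtain ⟨hpre, hmin⟩ := PySem.Chars.find_spec hnn
    by_contra hne
    exact (hmin 0 (by omega)) (by simpa using h)
  rw [PySem.Chars.findFrom_natCast cs sub i hi, h0]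
  simp

theorem pv_prefix_two_le (cs : List Char) (a b : Char) (p : Nat)
    (h : [a, b] <+: cs.drop p) : p + 2 ≤ cs.length := by
  have := h.length_le
  simp at this
  omega

theorem pv_findFrom_succ (cs sub : List Char) (i : Nat) (hi : i < cs.length)
    (h : ¬ sub <+: cs.drop i) :
    PySem.Chars.findFrom cs sub (i : Int) = PySem.Chars.findFrom cs sub ((i + 1 : Nat) : Int) := by
  have hi1 : i + 1 ≤ cs.length := hi
  by_cases hinf : sub <:+: cs.drop i
  · have hne : PySem.Chars.findFrom cs sub (i : Int) ≠ -1 := by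
      rw [ne_eq, PySem.Chars.findFrom_natCast_eq_neg_one_iff cs sub i (le_of_lt hi)]
      simpa using hinf
    obtain ⟨hle, hpre, hmin⟩ := PySem.Chars.findFrom_natCast_spec cs sub i (le_of_lt hi) hne
    set r := PySem.Chars.findFrom cs sub (i : Int) with hr
    have hrne : r.toNat ≠ i := by
      intro hri
      rw [hri] at hpre; exact h hpre
    have hri1 : i + 1 ≤ r.toNat := by omega
    have hne' : PySem.Chars.findFrom cs sub ((i + 1 : Nat) : Int) ≠ -1 := by
      rw [ne_eq, PySem.Chars.findFrom_natCast_eq_neg_one_iff cs sub (i + 1) hi1]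
      push Not
      have hdd : cs.drop r.toNat = (cs.drop (i + 1)).drop (r.toNat - (i + 1)) := by
        rw [List.drop_drop]; congr 1; omega
      rw [hdd] at hpre
      exact hpre.isInfix.trans (List.drop_suffix _ _).isInfix
    obtain ⟨hle', hpre', hmin'⟩ := PySem.Chars.findFrom_natCast_spec cs sub (i + 1) hi1 hne'
    set r' := PySem.Chars.findFrom cs sub ((i + 1 : Nat) : Int) with hr'
    have h1 : ¬ (r'.toNat < r.toNat) := fun hlt => hmin r'.toNat (by omega) hlt hpre'
    have h2 : ¬ (r.toNat < r'.toNat) := fun hlt => hmin' r.toNat (by omega) hlt hpre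
    omega
  · have h1 : PySem.Chars.findFrom cs sub (i : Int) = -1 := by
      rw [PySem.Chars.findFrom_natCast_eq_neg_one_iff cs sub i (le_of_lt hi)]; exact hinf
    have h2 : PySem.Chars.findFrom cs sub ((i + 1 : Nat) : Int) = -1 := by
      rw [PySem.Chars.findFrom_natCast_eq_neg_one_iff cs sub (i + 1) hi1]
      intro hinf2
      exact hinf (hinf2.trans (by simpa [List.drop_drop] using (List.drop_suffix 1 (cs.drop i)).isInfix))
    rw [h1, h2]

theorem pv_scan_eq (cs : List Char) (safe : Int) (hsafe : safe ≤ (cs.length : Int)) :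
    ∀ n i depth fuel, cs.length - i = n → i ≤ cs.length → cs.length - i < fuel →
      pvScanA cs safe i depth = pvScanB cs safe i depth fuel := by
  intro n
  induction n using Nat.strong_induction_on with
  | _ n IH =>
    intro i depth fuel hn hi hfuel
    obtain ⟨f, rfl⟩ : ∃ f, fuel = f + 1 := ⟨fuel - 1, by omega⟩
    by_cases hlt : (i : Int) < safe
    · have hilen : i < cs.length := by omega
      rw [pvScanA]
      rw [dif_pos hlt, if_pos (by omega : (i : Int) + 1 ≤ safe)]
      have hslice : PySem.List.slice cs (some (i : Int)) (some ((i : Int) + 2)) = (cs.drop i).take 2 := by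
        have := PySem.List.slice_natCast_add cs i 2
        simpa using this
      simp only [hslice, hlt, if_true]
      by_cases h1 : (cs.drop i).take 2 = ['/', '*']
      · have hpre : ['/', '*'] <+: cs.drop i := by
          rw [List.prefix_iff_eq_take]; simp [h1]
        have hlen2 : i + 2 ≤ cs.length := pv_prefix_two_le cs _ _ i hpre
        have ho : PySem.Chars.findFrom cs ['/', '*'] (i : Int) = (i : Int) :=
          pv_findFrom_self cs _ i (le_of_lt hilen) hpre
        have hc : PySem.Chars.findFrom cs ['*', '/'] (i : Int) = -1 ∨
            (i : Int) + 1 ≤ PySem.Chars.findFrom cs ['*', '/'] (i : Int) := by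
          by_cases hcne : PySem.Chars.findFrom cs ['*', '/'] (i : Int) = -1
          · exact Or.inl hcne
          · obtain ⟨hle, hpre2, _⟩ :=
              PySem.Chars.findFrom_natCast_spec cs ['*', '/'] i (le_of_lt hilen) hcne
            have hne : (PySem.Chars.findFrom cs ['*', '/'] (i : Int)).toNat ≠ i := by
              intro he
              rw [he] at hpre2
              obtain ⟨t1, ht1⟩ := hpre
              obtain ⟨t2, ht2⟩ := hpre2
              rw [← ht1] at ht2
              simp at ht2
            right; omega
        rw [if_pos h1, pvScanB]
        simp only [ho]
        rw [if_neg (by omega : ¬ ((i : Int) < 0 ∧ PySem.Chars.findFrom cs ['*', '/'] (i : Int) < 0))]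
        have hcond : (PySem.Chars.findFrom cs ['*', '/'] (i : Int) < 0 ∨
            (0 ≤ (i : Int) ∧ (i : Int) < PySem.Chars.findFrom cs ['*', '/'] (i : Int))) := by
          rcases hc with h | h
          · left; omega
          · right; exact ⟨by omega, by omega⟩
        rw [if_pos hcond]
        rw [if_neg (show ¬ (((i : Int), true).1 ≥ safe) by simp; omega)]
        simp only [Int.toNat_natCast, if_true]
        have hrec := IH (cs.length - (i + 2)) (by omega) (i + 2) (depth + 1) f rfl hlen2 (by omega)
        rw [← hrec]
      · by_cases h2 : (cs.drop i).take 2 = ['*', '/']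
        · have hpre : ['*', '/'] <+: cs.drop i := by
            rw [List.prefix_iff_eq_take]; simp [h2]
          have hlen2 : i + 2 ≤ cs.length := pv_prefix_two_le cs _ _ i hpre
          have hcf : PySem.Chars.findFrom cs ['*', '/'] (i : Int) = (i : Int) :=
            pv_findFrom_self cs _ i (le_of_lt hilen) hpre
          have hofar : PySem.Chars.findFrom cs ['/', '*'] (i : Int) = -1 ∨
              (i : Int) + 1 ≤ PySem.Chars.findFrom cs ['/', '*'] (i : Int) := by
            by_cases hone : PySem.Chars.findFrom cs ['/', '*'] (i : Int) = -1
            · exact Or.inl hone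
            · obtain ⟨hle, hpre2, _⟩ :=
                PySem.Chars.findFrom_natCast_spec cs ['/', '*'] i (le_of_lt hilen) hone
              have hne : (PySem.Chars.findFrom cs ['/', '*'] (i : Int)).toNat ≠ i := by
                intro he
                rw [he] at hpre2
                obtain ⟨t1, ht1⟩ := hpre
                obtain ⟨t2, ht2⟩ := hpre2
                rw [← ht1] at ht2
                simp at ht2
              right; omega
          rw [if_neg h1, if_pos h2, pvScanB]
          simp only [hcf]
          rw [if_neg (by omega : ¬ (PySem.Chars.findFrom cs ['/', '*'] (i : Int) < 0 ∧ (i : Int) < 0))]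
          have hcond : ¬ ((i : Int) < 0 ∨
              (0 ≤ PySem.Chars.findFrom cs ['/', '*'] (i : Int) ∧
                PySem.Chars.findFrom cs ['/', '*'] (i : Int) < (i : Int))) := by
            rcases hofar with h | h
            · omega
            · omega
          rw [if_neg hcond]
          rw [if_neg (show ¬ (((i : Int), false).1 ≥ safe) by simp; omega)]
          simp only [Int.toNat_natCast, Bool.false_eq_true, if_false]
          have hrec := IH (cs.length - (i + 2)) (by omega) (i + 2)
            (if depth > 0 then depth - 1 else depth) f rfl hlen2 (by omega)
          rw [← hrec]
        · have hnp1 : ¬ ['/', '*'] <+: cs.drop i := fun hp => by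
            have := (List.prefix_iff_eq_take.mp hp).symm
            simp at this
            exact h1 this
          have hnp2 : ¬ ['*', '/'] <+: cs.drop i := fun hp => by
            have := (List.prefix_iff_eq_take.mp hp).symm
            simp at this
            exact h2 this
          rw [if_neg h1, if_neg h2]
          have hstep : pvScanB cs safe i depth (f + 1) = pvScanB cs safe (i + 1) depth (f + 1) := by
            conv_lhs => rw [pvScanB]
            conv_rhs => rw [pvScanB]
            rw [pv_findFrom_succ cs ['/', '*'] i hilen hnp1,
              pv_findFrom_succ cs ['*', '/'] i hilen hnp2]
          rw [hstep]
          exact IH (cs.length - (i + 1)) (by omega) (i + 1) depth (f + 1) rfl (by omega) (by omega)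
    · rw [pvScanA, dif_neg hlt, pvScanB]
      by_cases hoc : (PySem.Chars.findFrom cs ['/', '*'] (i : Int) < 0 ∧
          PySem.Chars.findFrom cs ['*', '/'] (i : Int) < 0)
      · rw [if_pos hoc]
      · rw [if_neg hoc]
        simp only [ge_iff_le]
        by_cases hcnd : (PySem.Chars.findFrom cs ['*', '/'] (i : Int) < 0 ∨
            (0 ≤ PySem.Chars.findFrom cs ['/', '*'] (i : Int) ∧
              PySem.Chars.findFrom cs ['/', '*'] (i : Int) < PySem.Chars.findFrom cs ['*', '/'] (i : Int)))
        · have hone : PySem.Chars.findFrom cs ['/', '*'] (i : Int) ≠ -1 := by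
            rcases hcnd with h | h <;> omega
          have := (PySem.Chars.findFrom_natCast_spec cs ['/', '*'] i hi hone).1
          rw [if_pos hcnd,
            if_pos (show safe ≤ (PySem.Chars.findFrom cs ['/', '*'] (i : Int), true).1 by simp; omega)]
        · have hone : PySem.Chars.findFrom cs ['*', '/'] (i : Int) ≠ -1 := by omega
          have := (PySem.Chars.findFrom_natCast_spec cs ['*', '/'] i hi hone).1
          rw [if_neg hcnd,
            if_pos (show safe ≤ (PySem.Chars.findFrom cs ['*', '/'] (i : Int), false).1 by simp; omega)]

theorem pv_phase2 (o c lo : Int) :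
    (if o < 0 then false else if c < 0 then true else if c ≤ o then false
      else decide (lo > o + 2 ∧ lo < c)) =
    decide (0 ≤ o ∧ (c < 0 ∨ (o < c ∧ o + 2 < lo ∧ lo < c))) := by
  split_ifs with h1 h2 h3
  · simp; omega
  · simp; omega
  · simp; omega
  · have h4 : 0 ≤ o := by omega
    have h5 : o < c := by omega
    have h6 : ¬ c < 0 := by omega
    simp [h4, h5, h6]

theorem pv_main (text : String) (offset : Int) :
    isInsideBlockComment text offset = isInsideBlockComment_alt text offset := by
  unfold isInsideBlockComment isInsideBlockComment_alt
  simp only []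
  set cs := text.toList with hcs
  set safe := min offset (cs.length : Int) with hsafedef
  have hsl : safe ≤ (cs.length : Int) := min_le_right _ _
  have hscan : pvScanA cs safe 0 0 = pvScanB cs safe 0 0 (cs.length + 1) :=
    pv_scan_eq cs safe hsl cs.length 0 0 (cs.length + 1) rfl (by omega) (by omega)
  rw [hscan]
  by_cases hd : pvScanB cs safe 0 0 (cs.length + 1) > 0
  · simp [hd]
  · rw [if_neg hd, if_neg hd]
    have hL := pv_neg_one_le_rfindFrom cs ['\n'] safe
    set L := PySem.Chars.rfindFrom cs ['\n'] 0 (some safe) with hLdef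
    have hls : (if L ≥ 0 then L + 1 else 0) = L + 1 := by split_ifs <;> omega
    rw [hls]
    set nn := PySem.Chars.findFrom cs ['\n'] safe with hnndef
    have hle : (if nn ≥ 0 then nn else (cs.length : Int)) = (if nn < 0 then (cs.length : Int) else nn) := by
      split_ifs <;> omega
    rw [hle]
    exact pv_phase2 _ _ _

-- ===== VERDICT (by name: the statement is the Claim_ definition above) =====
theorem isInsideBlockComment_spec : Claim_equal_isInsideBlockComment := by
  intro text offset _
  unfold Spec_isInsideBlockComment
  exact pv_main text offset
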